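-- pv_equiv track=rewrite | github.com/pozdnyavladimer-jpg/gitcube-lab | apps/graph_school/sim_10_arch.py | count_cycle_nodes
-- ===== SOURCE A (Python) =====
-- from collections import defaultdict
-- from typing import Dict, List, Tuple, Set
--
-- def count_cycle_nodes(nodes: List[str], edges: List[Tuple[str, str]]) -> int:
--     """
--     Returns number of nodes that are part of at least one directed cycle.
--     Lightweight DFS, no external deps.
--     """
--     adj: Dict[str, List[str]] = defaultdict(list)
--     for u, v in edges:
--         adj[u].append(v)
--
--     visited: Set[str] = set()
--     stack: Set[str] = set()
--     in_cycle: Set[str] = set()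
--     parent: Dict[str, str] = {}
--
--     def dfs(u: str) -> None:
--         visited.add(u)
--         stack.add(u)
--         for v in adj[u]:
--             if v not in visited:
--                 parent[v] = u
--                 dfs(v)
--             elif v in stack:
--                 cur = u
--                 in_cycle.add(v)
--                 while cur != v and cur in parent:
--                     in_cycle.add(cur)
--                     cur = parent[cur]
--                 in_cycle.add(cur)
--         stack.remove(u)
--
--     for n in nodes:
--         if n not in visited:
--             dfs(n)
--
--     return len(in_cycle)
-- ===== SOURCE B (Python) =====
-- def count_cycle_nodes(nodes, edges):
--     """
--     Same result as the recursive version, but with an iterative DFS over an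
--     explicit stack of (node, remaining-neighbors) frames instead of recursion.
--     """
--     adj = {}
--     for u, v in edges:
--         adj.setdefault(u, []).append(v)
--
--     visited = set()
--     onstack = set()
--     in_cycle = set()
--     parent = {}
--
--     for root in nodes:
--         if root in visited:
--             continue
--         visited.add(root)
--         onstack.add(root)
--         frames = [(root, adj.get(root, []))]
--         while frames:
--             u, vs = frames[-1]
--             if not vs:
--                 onstack.discard(u)
--                 frames.pop()
--                 continue
--             v, vs = vs[0], vs[1:]
--             frames[-1] = (u, vs)
--             if v not in visited:
--                 parent[v] = u
--                 visited.add(v)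
--                 onstack.add(v)
--                 frames.append((v, adj.get(v, [])))
--             elif v in onstack:
--                 in_cycle.add(v)
--                 cur = u
--                 while cur != v and cur in parent:
--                     in_cycle.add(cur)
--                     cur = parent[cur]
--                 in_cycle.add(cur)
--     return len(in_cycle)
-- ===== Notes on version B (the rewrite author's own statement) =====
-- stated objective: alternative
-- what changed: The recursive dfs is replaced by an iterative DFS driven by an explicit stack of (node, remaining-neighbors) frames, with the same back-edge parent-chain marking; no recursion remains.
import Mathlib
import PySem

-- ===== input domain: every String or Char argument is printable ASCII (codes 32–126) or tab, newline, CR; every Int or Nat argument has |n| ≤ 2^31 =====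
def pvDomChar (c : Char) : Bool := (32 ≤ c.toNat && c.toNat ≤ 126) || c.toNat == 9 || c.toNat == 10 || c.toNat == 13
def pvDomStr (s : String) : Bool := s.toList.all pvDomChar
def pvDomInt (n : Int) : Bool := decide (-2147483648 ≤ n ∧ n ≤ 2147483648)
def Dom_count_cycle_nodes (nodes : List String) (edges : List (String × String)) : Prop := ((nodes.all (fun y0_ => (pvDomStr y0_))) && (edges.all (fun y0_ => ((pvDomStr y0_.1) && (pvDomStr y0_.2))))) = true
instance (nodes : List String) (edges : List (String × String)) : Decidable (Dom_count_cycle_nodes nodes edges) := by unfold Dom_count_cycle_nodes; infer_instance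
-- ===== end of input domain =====

-- B replaces A's recursive DFS by an iterative DFS over an explicit frame stack (same cost; objective: alternative).
-- Fuel notes shared by both ports: the DFS fuel (structural depth fuel and the threaded call budget, consumed once per
-- DFS call = once per frame push) is nodes.length + edges.length + 1, strictly more than the number of distinct
-- vertices ever first-visited, so the fuel-exhausted fallbacks are never reached; the parent-chain walk uses
-- fuel = parent.size + 1, enough because parent chains are acyclic (each parent was visited strictly earlier).
-- Both ports truncate at identical points by construction, so the equivalence theorem is unconditional.

-- state shared by both ports (visited / stack / in_cycle sets and the parent dict of A's Python)
structure PvSt where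
  visited : PySem.Set String
  onstack : PySem.Set String
  incycle : PySem.Set String
  parent  : PySem.Dict String String
deriving Repr, DecidableEq

abbrev PvAdj := PySem.Dict String (List String)

-- ===== PORT A =====
-- the back-edge while loop: in_cycle.add(v); cur = u; while cur != v and cur in parent: in_cycle.add(cur); cur = parent[cur]; in_cycle.add(cur)
def pvChainA (fuel : Nat) (cur v : String) (inc : PySem.Set String) (par : PySem.Dict String String) : PySem.Set String :=
  match fuel with
  | 0 => inc
  | f + 1 =>
    if cur ≠ v ∧ (par.get? cur).isSome then
      pvChainA f ((par.get? cur).getD "") v (PySem.Set.add inc cur) par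
    else PySem.Set.add inc cur

def pvBackA (u v : String) (s : PvSt) : PvSt :=
  { s with incycle := pvChainA (s.parent.size + 1) u v (PySem.Set.add s.incycle v) s.parent }

mutual
-- dfs(u); the threaded budget g is decremented once per call so A and B truncate identically (never reached in practice)
def pvDfsA (F : Nat) (adj : PvAdj) (u : String) (s : PvSt) (g : Nat) : PvSt × Nat :=
  match F, g with
  | F + 1, g + 1 =>
    let s1 : PvSt := { s with visited := s.visited.add u, onstack := s.onstack.add u }
    let r := pvDfsListA F adj u (adj.getD u []) s1 g
    -- stack.remove u: u was added on entry and only this call removes it, so remove = discard here (exact)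
    ({ r.1 with onstack := r.1.onstack.discard u }, r.2)
  | _, _ => (s, 0)
  termination_by (F, 0)
  decreasing_by apply Prod.Lex.left; omega

-- for v in adj[u]: …
def pvDfsListA (F : Nat) (adj : PvAdj) (u : String) (vs : List String) (s : PvSt) (g : Nat) : PvSt × Nat :=
  match vs with
  | [] => (s, g)
  | v :: rest =>
    let r :=
      if ¬ (s.visited.contains v) then
        pvDfsA F adj v { s with parent := s.parent.insert v u } g
      else if s.onstack.contains v then (pvBackA u v s, g)
      else (s, g)
    pvDfsListA F adj u rest r.1 r.2
  termination_by (F, vs.length + 1)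
  decreasing_by all_goals first
    | (apply Prod.Lex.left; omega)
    | (apply Prod.Lex.right; simp)
end

def count_cycle_nodes (nodes : List String) (edges : List (String × String)) : Int :=
  let adj : PvAdj := edges.foldl (fun d p => d.insert p.1 (d.getD p.1 [] ++ [p.2])) (PySem.Dict.mk [])
  let F := nodes.length + edges.length + 1
  let s := nodes.foldl
    (fun s n => if s.visited.contains n then s else (pvDfsA F adj n s F).1)
    ⟨[], [], [], PySem.Dict.mk []⟩
  PySem.Set.len s.incycle

-- ===== PORT B =====
-- identical back-edge chain walk (B's Python keeps this loop verbatim)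
def pvChainB (fuel : Nat) (cur v : String) (inc : PySem.Set String) (par : PySem.Dict String String) : PySem.Set String :=
  match fuel with
  | 0 => inc
  | f + 1 =>
    if cur ≠ v ∧ (par.get? cur).isSome then
      pvChainB f ((par.get? cur).getD "") v (PySem.Set.add inc cur) par
    else PySem.Set.add inc cur

def pvBackB (u v : String) (s : PvSt) : PvSt :=
  { s with incycle := pvChainB (s.parent.size + 1) u v (PySem.Set.add s.incycle v) s.parent }

-- the while-frames loop; frames head = frames[-1]; budget g is consumed once per push (never exhausted in practice)
def pvMachineB (adj : PvAdj) (frames : List (String × List String)) (s : PvSt) (g : Nat) : PvSt :=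
  match frames with
  | [] => s
  | (u, []) :: rest =>
    pvMachineB adj rest { s with onstack := s.onstack.discard u } g
  | (u, v :: vs) :: rest =>
    if ¬ (s.visited.contains v) then
      match g with
      | 0 => pvMachineB adj ((u, vs) :: rest) { s with parent := s.parent.insert v u } 0
      | g + 1 =>
        let s1 : PvSt := { s with parent := s.parent.insert v u }
        pvMachineB adj ((v, adj.getD v []) :: (u, vs) :: rest)
          { s1 with visited := s1.visited.add v, onstack := s1.onstack.add v } g
    else if s.onstack.contains v then pvMachineB adj ((u, vs) :: rest) (pvBackB u v s) g
    else pvMachineB adj ((u, vs) :: rest) s g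
termination_by (g, (frames.map (fun p => p.2.length + 1)).sum)
decreasing_by all_goals first
  | (apply Prod.Lex.left; omega)
  | (apply Prod.Lex.right; simp)

def count_cycle_nodes_alt (nodes : List String) (edges : List (String × String)) : Int :=
  let adj : PvAdj := edges.foldl (fun d p => d.modify p.1 [] (fun l => l ++ [p.2])) (PySem.Dict.mk [])
  let g := nodes.length + edges.length
  let s := nodes.foldl
    (fun s n =>
      if s.visited.contains n then s
      else
        pvMachineB adj [(n, adj.getD n [])]
          { s with visited := s.visited.add n, onstack := s.onstack.add n } g)
    ⟨[], [], [], PySem.Dict.mk []⟩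
  PySem.Set.len s.incycle

-- ===== PRECONDITION & SPEC =====
def Spec_count_cycle_nodes (nodes : List String) (edges : List (String × String)) (out : Int) : Prop := out = count_cycle_nodes_alt nodes edges
instance (nodes : List String) (edges : List (String × String)) (out : Int) : Decidable (Spec_count_cycle_nodes nodes edges out) := by unfold Spec_count_cycle_nodes; infer_instance

-- ===== CLAIM (what is proved, stated in full; the proofs are below) =====
def Claim_equal_count_cycle_nodes : Prop := ∀ (nodes : List String) (edges : List (String × String)), Dom_count_cycle_nodes nodes edges → Spec_count_cycle_nodes nodes edges (count_cycle_nodes nodes edges)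

-- ===== LEMMAS AND PROOFS =====

theorem pvChain_eq (fuel : Nat) (cur v : String) (inc : PySem.Set String) (par : PySem.Dict String String) :
    pvChainB fuel cur v inc par = pvChainA fuel cur v inc par := by
  induction fuel generalizing cur inc with
  | zero => rfl
  | succ f ih => simp only [pvChainA, pvChainB]; split_ifs <;> simp [ih]

theorem pvBack_eq (u v : String) (s : PvSt) : pvBackB u v s = pvBackA u v s := by
  simp [pvBackA, pvBackB, pvChain_eq]

mutual
theorem pvDfsA_budget (F : Nat) (adj : PvAdj) (u : String) (s : PvSt) (g : Nat) :
    (pvDfsA F adj u s g).2 ≤ g := by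
  match F, g with
  | 0, g => simp [pvDfsA]
  | F + 1, 0 => simp [pvDfsA]
  | F + 1, g + 1 =>
    have h := pvDfsListA_budget F adj u (adj.getD u [])
      { s with visited := s.visited.add u, onstack := s.onstack.add u } g
    simp only [pvDfsA]
    omega
  termination_by (F, 0)
  decreasing_by apply Prod.Lex.left; omega
theorem pvDfsListA_budget (F : Nat) (adj : PvAdj) (u : String) (vs : List String) (s : PvSt) (g : Nat) :
    (pvDfsListA F adj u vs s g).2 ≤ g := by
  match vs with
  | [] => simp [pvDfsListA]
  | v :: rest =>
    simp only [pvDfsListA]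
    split_ifs with h1 h2
    · exact pvDfsListA_budget F adj u rest (pvBackA u v s) g
    · exact pvDfsListA_budget F adj u rest s g
    · exact le_trans
        (pvDfsListA_budget F adj u rest
          (pvDfsA F adj v { s with parent := s.parent.insert v u } g).1
          (pvDfsA F adj v { s with parent := s.parent.insert v u } g).2)
        (pvDfsA_budget F adj v { s with parent := s.parent.insert v u } g)
  termination_by (F, vs.length + 1)
  decreasing_by all_goals first
    | (apply Prod.Lex.left; omega)
    | (apply Prod.Lex.right; simp)
end

theorem pvSim (F : Nat) (adj : PvAdj) (u : String) (vs : List String) (s : PvSt) (g : Nat)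
    (rest : List (String × List String)) (hg : g ≤ F) :
    pvMachineB adj ((u, vs) :: rest) s g
      = pvMachineB adj rest
          { (pvDfsListA F adj u vs s g).1 with
              onstack := (pvDfsListA F adj u vs s g).1.onstack.discard u }
          (pvDfsListA F adj u vs s g).2 := by
  match vs with
  | [] =>
    rw [pvMachineB.eq_def]
    simp only [pvDfsListA]
  | v :: vsr =>
    by_cases hv : v ∈ s.visited
    · by_cases hs : v ∈ s.onstack
      · -- back edge: both sides take the chain-walk step, then continue with vsr
        have hstep : pvMachineB adj ((u, v :: vsr) :: rest) s g
            = pvMachineB adj ((u, vsr) :: rest) (pvBackB u v s) g := by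
          rw [pvMachineB.eq_def]; simp [hv, hs]
        have hlist : pvDfsListA F adj u (v :: vsr) s g = pvDfsListA F adj u vsr (pvBackA u v s) g := by
          simp only [pvDfsListA]; simp [hv, hs]
        rw [hstep, hlist, pvBack_eq]
        exact pvSim F adj u vsr (pvBackA u v s) g rest hg
      · -- visited, off-stack neighbor: skipped on both sides
        have hstep : pvMachineB adj ((u, v :: vsr) :: rest) s g
            = pvMachineB adj ((u, vsr) :: rest) s g := by
          rw [pvMachineB.eq_def]; simp [hv, hs]
        have hlist : pvDfsListA F adj u (v :: vsr) s g = pvDfsListA F adj u vsr s g := by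
          simp only [pvDfsListA]; simp [hv, hs]
        rw [hstep, hlist]
        exact pvSim F adj u vsr s g rest hg
    · -- tree edge
      cases g with
      | zero =>
        -- budget exhausted (never happens with the chosen initial budget): both sides only record the parent
        have hA : ∀ F', pvDfsA F' adj v { s with parent := s.parent.insert v u } 0
            = ({ s with parent := s.parent.insert v u }, 0) := by
          intro F'; cases F' <;> simp [pvDfsA]
        have hstep : pvMachineB adj ((u, v :: vsr) :: rest) s 0
            = pvMachineB adj ((u, vsr) :: rest) { s with parent := s.parent.insert v u } 0 := by
          rw [pvMachineB.eq_def]; simp [hv]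
        have hlist : pvDfsListA F adj u (v :: vsr) s 0
            = pvDfsListA F adj u vsr { s with parent := s.parent.insert v u } 0 := by
          simp only [pvDfsListA]; simp [hv, hA]
        rw [hstep, hlist]
        exact pvSim F adj u vsr { s with parent := s.parent.insert v u } 0 rest hg
      | succ h =>
        have hF1 : 1 ≤ F := by omega
        have hFs : F - 1 + 1 = F := by omega
        have hh : h ≤ F - 1 := by omega
        have hstep : pvMachineB adj ((u, v :: vsr) :: rest) s (h + 1)
            = pvMachineB adj ((v, adj.getD v []) :: (u, vsr) :: rest)
                { s with visited := s.visited.add v, onstack := s.onstack.add v,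
                         parent := s.parent.insert v u } h := by
          rw [pvMachineB.eq_def]; simp [hv]
        have hA : pvDfsA (F - 1 + 1) adj v { s with parent := s.parent.insert v u } (h + 1)
            = ({ (pvDfsListA (F - 1) adj v (adj.getD v [])
                    { s with visited := s.visited.add v, onstack := s.onstack.add v,
                             parent := s.parent.insert v u } h).1 with
                   onstack := (pvDfsListA (F - 1) adj v (adj.getD v [])
                    { s with visited := s.visited.add v, onstack := s.onstack.add v,
                             parent := s.parent.insert v u } h).1.onstack.discard v },
               (pvDfsListA (F - 1) adj v (adj.getD v [])
                    { s with visited := s.visited.add v, onstack := s.onstack.add v,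
                             parent := s.parent.insert v u } h).2) := by
          simp [pvDfsA]
        rw [hFs] at hA
        have hlist : pvDfsListA F adj u (v :: vsr) s (h + 1)
            = pvDfsListA F adj u vsr
                (pvDfsA F adj v { s with parent := s.parent.insert v u } (h + 1)).1
                (pvDfsA F adj v { s with parent := s.parent.insert v u } (h + 1)).2 := by
          simp only [pvDfsListA]; simp [hv]
        rw [hstep,
          pvSim (F - 1) adj v (adj.getD v [])
            { s with visited := s.visited.add v, onstack := s.onstack.add v,
                     parent := s.parent.insert v u } h ((u, vsr) :: rest) hh,
          hlist, hA]
        exact pvSim F adj u vsr _ _ rest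
          (le_trans (pvDfsListA_budget (F - 1) adj v (adj.getD v []) _ h)
            (le_trans hh (Nat.sub_le F 1)))
  termination_by (F, vs.length)
  decreasing_by all_goals first
    | (apply Prod.Lex.left; omega)
    | (apply Prod.Lex.right; simp)

-- one root of the outer for-loop: the recursive dfs call equals one full run of the frame machine
theorem pvRoot (adj : PvAdj) (n : String) (s : PvSt) (L : Nat) :
    (pvDfsA (L + 1) adj n s (L + 1)).1
      = pvMachineB adj [(n, adj.getD n [])]
          { s with visited := s.visited.add n, onstack := s.onstack.add n } L := by
  have h := pvSim L adj n (adj.getD n [])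
    { s with visited := s.visited.add n, onstack := s.onstack.add n } L [] (le_refl L)
  rw [h, pvMachineB.eq_def]
  simp [pvDfsA]

-- ===== VERDICT (by name: the statement is the Claim_ definition above) =====
theorem count_cycle_nodes_spec : Claim_equal_count_cycle_nodes := by
  intro nodes edges _
  unfold Spec_count_cycle_nodes count_cycle_nodes count_cycle_nodes_alt
  simp only [PySem.Dict.modify]
  have hstep :
      (fun (s : PvSt) n => if s.visited.contains n then s
        else (pvDfsA (nodes.length + edges.length + 1)
          (edges.foldl (fun d p => d.insert p.1 (d.getD p.1 [] ++ [p.2])) (PySem.Dict.mk [])) n s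
          (nodes.length + edges.length + 1)).1)
      = (fun (s : PvSt) n => if s.visited.contains n then s
        else pvMachineB
          (edges.foldl (fun d p => d.insert p.1 (d.getD p.1 [] ++ [p.2])) (PySem.Dict.mk []))
          [(n, (edges.foldl (fun d p => d.insert p.1 (d.getD p.1 [] ++ [p.2])) (PySem.Dict.mk [])).getD n [])]
          { s with visited := s.visited.add n, onstack := s.onstack.add n }
          (nodes.length + edges.length)) := by
    funext s n
    have hc := PySem.Set.contains_iff s.visited n
    by_cases hm : n ∈ s.visited
    · rw [if_pos (hc.mpr hm), if_pos (hc.mpr hm)]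
    · have hcf : ¬ (s.visited.contains n = true) := fun h => hm (hc.mp h)
      rw [if_neg hcf, if_neg hcf]
      exact pvRoot _ n s (nodes.length + edges.length)
  rw [hstep]
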